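-- pv_equiv track=rewrite | github.com/aleksaa01/codefights | Challenges/timedReading.py | timedReading
-- ===== SOURCE A (Python) =====
-- def timedReading(maxLength, text):
--     wlen = 0
--     read_words = 0
--     for i in text + '.':
--         if 'a' <= i <= 'z' or 'A' <= i <= 'Z':
--             wlen += 1
--         else:
--             if 0 < wlen <= maxLength:
--                 read_words += 1
--             wlen = 0
--
--     return read_words
-- ===== SOURCE B (Python) =====
-- def timedReading(maxLength, text):
--     masked = ''.join(c if ('a' <= c <= 'z' or 'A' <= c <= 'Z') else ' ' for c in text)
--     return sum(1 for w in masked.split() if len(w) <= maxLength)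
-- ===== Notes on version B (the rewrite author's own statement) =====
-- stated objective: idiomatic
-- what changed: Replaces A's hand-rolled character state machine (run length + sentinel '.') with mask-non-letters-to-spaces, str.split(), and a count of the short words.
import Mathlib
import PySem

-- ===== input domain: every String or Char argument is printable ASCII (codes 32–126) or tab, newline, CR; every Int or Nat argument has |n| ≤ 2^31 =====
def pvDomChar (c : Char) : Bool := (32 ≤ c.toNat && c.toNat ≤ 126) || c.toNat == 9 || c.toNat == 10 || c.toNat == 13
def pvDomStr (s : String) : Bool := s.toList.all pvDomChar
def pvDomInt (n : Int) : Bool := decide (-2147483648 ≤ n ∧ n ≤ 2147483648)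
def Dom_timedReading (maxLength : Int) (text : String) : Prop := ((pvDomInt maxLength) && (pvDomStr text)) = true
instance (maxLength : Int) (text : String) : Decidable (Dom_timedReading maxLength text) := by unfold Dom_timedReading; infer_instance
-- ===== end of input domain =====

-- B replaces A's character state machine (run length + '.' sentinel) with
-- mask-non-letters-to-spaces, split on whitespace, count words ≤ maxLength (idiomatic; same cost).

-- ===== PORT A =====
-- letter test 'a' <= i <= 'z' or 'A' <= i <= 'Z' (shared literal test of both Pythons)
def pvIsLetter (c : Char) : Bool := ('a' ≤ c && c ≤ 'z') || ('A' ≤ c && c ≤ 'Z')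

def timedReading (maxLength : Int) (text : String) : Int :=
  (((text.toList ++ ['.']).foldl
    (fun (st : Int × Int) (i : Char) =>
      if pvIsLetter i then (st.1 + 1, st.2)
      else (0, if 0 < st.1 ∧ st.1 ≤ maxLength then st.2 + 1 else st.2))
    (0, 0))).2

-- ===== PORT B =====
def timedReading_alt (maxLength : Int) (text : String) : Int :=
  let masked := text.toList.map (fun c => if pvIsLetter c then c else ' ')
  (((PySem.Chars.split₀ masked).filter (fun w => (w.length : Int) ≤ maxLength)).length : Int)

-- ===== PRECONDITION & SPEC =====
def Spec_timedReading (maxLength : Int) (text : String) (out : Int) : Prop := out = timedReading_alt maxLength text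
instance (maxLength : Int) (text : String) (out : Int) : Decidable (Spec_timedReading maxLength text out) := by unfold Spec_timedReading; infer_instance

-- ===== CLAIM (what is proved, stated in full; the proofs are below) =====
def Claim_equal_timedReading : Prop := ∀ (maxLength : Int) (text : String), Dom_timedReading maxLength text → Spec_timedReading maxLength text (timedReading maxLength text)

-- ===== LEMMAS AND PROOFS =====

theorem isspace_of_letter (c : Char) (h : pvIsLetter c = true) : PySem.Chars.isspace c = false := by
  have h' : (97 ≤ c.toNat ∧ c.toNat ≤ 122) ∨ (65 ≤ c.toNat ∧ c.toNat ≤ 90) := by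
    unfold pvIsLetter at h
    simp only [Bool.or_eq_true, Bool.and_eq_true, decide_eq_true_eq, Char.le_def,
      UInt32.le_iff_toNat_le] at h
    exact h
  unfold PySem.Chars.isspace
  simp only [Bool.or_eq_false_iff, Bool.and_eq_false_iff, decide_eq_false_iff_not]
  omega

theorem isspace_space : PySem.Chars.isspace ' ' = true := by decide

-- count of short words
def pvCnt (maxLength : Int) (ws : List (List Char)) : Int :=
  ((ws.filter (fun w => (w.length : Int) ≤ maxLength)).length : Int)

theorem go_acc (s cur acc) : PySem.Chars.split₀.go s cur acc = acc.reverse ++ PySem.Chars.split₀.go s cur [] := by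
  induction s generalizing cur acc with
  | nil =>
      by_cases h : cur.isEmpty <;> simp [PySem.Chars.split₀.go, h]
  | cons c rest ih =>
      by_cases hs : PySem.Chars.isspace c
      · by_cases h : cur.isEmpty
        · simp only [PySem.Chars.split₀.go, hs, h, if_true]
          exact ih [] acc
        · have h' : cur.isEmpty = false := by simpa using h
          simp only [PySem.Chars.split₀.go, hs, h', Bool.false_eq_true, if_true, if_false]
          rw [ih [] (cur.reverse :: acc), ih [] [cur.reverse]]
          simp
      · have hs' : PySem.Chars.isspace c = false := by simpa using hs
        simp only [PySem.Chars.split₀.go, hs', Bool.false_eq_true, if_false]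
        rw [ih (c :: cur) acc]

theorem main_loop (maxLength : Int) (cs : List Char) : ∀ (cur : List Char) (rw : Int),
    ((cs ++ ['.']).foldl
      (fun (st : Int × Int) (i : Char) =>
        if pvIsLetter i then (st.1 + 1, st.2)
        else (0, if 0 < st.1 ∧ st.1 ≤ maxLength then st.2 + 1 else st.2))
      ((cur.length : Int), rw)).2
    = rw + pvCnt maxLength (PySem.Chars.split₀.go (cs.map (fun c => if pvIsLetter c then c else ' ')) cur []) := by
  induction cs with
  | nil =>
      intro cur rw
      have hdot : pvIsLetter '.' = false := by decide
      by_cases h : cur.isEmpty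
      · have : cur = [] := by simpa [List.isEmpty_iff] using h
        subst this
        simp [PySem.Chars.split₀.go, pvCnt, hdot]
      · have hlen : 0 < cur.length := by
          cases cur with
          | nil => simp at h
          | cons a l => simp
        simp only [List.nil_append, List.foldl_cons, List.foldl_nil, hdot, if_false,
          List.map_nil, PySem.Chars.split₀.go, h, if_false]
        by_cases hm : (cur.length : Int) ≤ maxLength
        · simp [pvCnt, hm, hlen]
        · simp [pvCnt, hm, hlen]
  | cons c rest ih =>
      intro cur rw
      by_cases hc : pvIsLetter c
      · have hns := isspace_of_letter c hc
        simp only [List.cons_append, List.foldl_cons, hc, if_true, List.map_cons,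
          PySem.Chars.split₀.go, hns, if_false]
        have := ih (c :: cur) rw
        simpa [Int.add_comm] using this
      · have hc' : pvIsLetter c = false := by simpa using hc
        simp only [List.cons_append, List.foldl_cons, hc', Bool.false_eq_true, if_false,
          List.map_cons, PySem.Chars.split₀.go, isspace_space, if_true]
        by_cases h : cur.isEmpty
        · have hcur : cur = [] := by simpa [List.isEmpty_iff] using h
          subst hcur
          simp only [List.length_nil, Int.natCast_zero, h, if_true]
          have := ih [] (rw + if (0:Int) < 0 ∧ (0:Int) ≤ maxLength then 1 else 0)
          simpa using ih [] rw
        · have h' : cur.isEmpty = false := by simpa using h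
          have hlen : 0 < cur.length := by
            cases cur with
            | nil => simp at h'
            | cons a l => simp
          simp only [h', Bool.false_eq_true, if_false]
          rw [go_acc _ [] [cur.reverse]]
          by_cases hm : (cur.length : Int) ≤ maxLength
          · have hcond : 0 < (cur.length : Int) ∧ (cur.length : Int) ≤ maxLength :=
              ⟨by exact_mod_cast hlen, hm⟩
            rw [if_pos hcond]
            have := ih [] (rw + 1)
            simp only [List.length_nil, Int.natCast_zero] at this
            rw [this]
            simp [pvCnt, hm]
            omega
          · have hcond : ¬(0 < (cur.length : Int) ∧ (cur.length : Int) ≤ maxLength) :=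
              fun hx => hm hx.2
            rw [if_neg hcond]
            have := ih [] rw
            simp only [List.length_nil, Int.natCast_zero] at this
            rw [this]
            simp [pvCnt, hm]

-- ===== VERDICT (by name: the statement is the Claim_ definition above) =====
theorem timedReading_spec : Claim_equal_timedReading := by
  intro maxLength text _
  unfold Spec_timedReading timedReading timedReading_alt PySem.Chars.split₀
  have := main_loop maxLength text.toList [] 0
  simpa [pvCnt] using this
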